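-- pv_equiv track=rewrite | github.com/karu9/adventcalendar3 | src/day21/day21.py | regroup_grids
-- ===== SOURCE A (Python) =====
-- def regroup_grids(sub_grids):
--     grid = []
--     for row in range(len(sub_grids)):
--         for subrow in range(len(sub_grids[0][0])):
--             val = ''
--             for column in range(len(sub_grids[0])):
--                 val += sub_grids[row][column][subrow]
--             grid.append(val)
--     return grid
-- ===== SOURCE B (Python) =====
-- def regroup_grids(sub_grids):
--     if not sub_grids:
--         return []
--     r0 = len(sub_grids[0][0])
--     c0 = len(sub_grids[0])
--     grid = []
--     for block in sub_grids:
--         rows = [''] * r0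
--         for col in block[:c0]:
--             rows = [rows[j] + col[j] for j in range(r0)]
--         grid.extend(rows)
--     return grid
-- ===== Notes on version B (the rewrite author's own statement) =====
-- stated objective: alternative
-- what changed: Loop interchange: instead of A's subrow-outer/column-inner loops that build each output string one at a time, B keeps a vector of r0 partial row strings per block and folds the block's first c0 columns into it by elementwise concatenation, emitting the whole vector at once; Pre_ restricts to the inputs on which A returns (A raises IndexError on an empty first block or, when r0 > 0, on a block with fewer than c0 columns or a column among the first c0 shorter than r0).
import Mathlib
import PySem

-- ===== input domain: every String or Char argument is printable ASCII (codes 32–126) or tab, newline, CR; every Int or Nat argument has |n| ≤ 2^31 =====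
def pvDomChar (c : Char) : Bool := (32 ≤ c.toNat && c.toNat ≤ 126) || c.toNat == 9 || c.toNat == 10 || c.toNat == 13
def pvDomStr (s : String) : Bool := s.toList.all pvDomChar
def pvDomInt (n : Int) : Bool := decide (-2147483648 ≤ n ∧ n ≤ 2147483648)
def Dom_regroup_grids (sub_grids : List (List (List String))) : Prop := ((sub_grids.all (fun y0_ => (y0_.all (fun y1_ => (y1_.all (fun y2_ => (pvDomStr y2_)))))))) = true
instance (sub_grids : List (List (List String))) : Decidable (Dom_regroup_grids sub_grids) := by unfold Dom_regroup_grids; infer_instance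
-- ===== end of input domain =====

-- B interchanges the loops: per block it folds the columns into a vector of r0 partial row
-- strings (elementwise concatenation via zip) instead of A's subrow-outer/column-inner build
-- of one output string at a time; objective: alternative decomposition. No argument is mutated.

-- ===== PORT A =====
-- Python 'val' is a str built by '+='; it is carried as its character list ('' = [], '+=' = List.append)
-- and turned into a String when appended to grid — exact for Python string concatenation.
def regroup_grids (sub_grids : List (List (List String))) : List String :=
  (PySem.List.pyRange 0 (sub_grids.length : Int) 1).foldl (fun grid row =>
    (PySem.List.pyRange 0 ((PySem.List.pyGetD (PySem.List.pyGetD sub_grids 0 []) 0 []).length : Int) 1).foldl (fun grid subrow =>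
      grid ++ [String.ofList ((PySem.List.pyRange 0 ((PySem.List.pyGetD sub_grids 0 []).length : Int) 1).foldl (fun val column =>
        val ++ (PySem.List.pyGetD (PySem.List.pyGetD (PySem.List.pyGetD sub_grids row []) column []) subrow "").toList) [])]) grid) []

-- ===== PORT B =====
-- 'if not sub_grids: return []' is the leading if; [''] * r0 = List.replicate;
-- block[:c0] = PySem.List.slice; '[rows[j] + col[j] for j in range(r0)]' = map over pyRange
-- (rows[j]/col[j] via pyGetD: rows always has length r0, and a too-short col is outside Pre_);
-- grid.extend(rows) = grid ++ rows.
def regroup_grids_alt (sub_grids : List (List (List String))) : List String :=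
  if sub_grids.isEmpty then [] else
  let r0 := (PySem.List.pyGetD (PySem.List.pyGetD sub_grids 0 []) 0 []).length
  let c0 := (PySem.List.pyGetD sub_grids 0 []).length
  sub_grids.foldl (fun grid block =>
    grid ++ (PySem.List.slice block none (some (c0 : Int))).foldl
      (fun rows col => (PySem.List.pyRange 0 (r0 : Int) 1).map (fun j =>
        PySem.List.pyGetD rows j "" ++ PySem.List.pyGetD col j ""))
      (List.replicate r0 "")) []

-- ===== PRECONDITION & SPEC =====
-- Pre_ is exactly the set of inputs on which the Python A returns normally: on its complement A
-- raises IndexError (empty first block, or with r0 > 0 a block with fewer than c0 columns or a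
-- column among the first c0 shorter than r0).
def Pre_regroup_grids (sub_grids : List (List (List String))) : Prop :=
  sub_grids = [] ∨
  ((sub_grids.getD 0 []) ≠ [] ∧
   (((sub_grids.getD 0 []).getD 0 []).length = 0 ∨
    ∀ b ∈ sub_grids, (sub_grids.getD 0 []).length ≤ b.length ∧
      ∀ j ∈ List.range (sub_grids.getD 0 []).length,
        ((sub_grids.getD 0 []).getD 0 []).length ≤ (b.getD j []).length))
instance (sub_grids : List (List (List String))) : Decidable (Pre_regroup_grids sub_grids) := by
  unfold Pre_regroup_grids; infer_instance
def pvWitness_regroup_grids : List (List (List String)) :=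
  [[["ab", "cd"], ["ef", "gh"]], [["ij", "kl"], ["mn", "op"]]]

def Spec_regroup_grids (sub_grids : List (List (List String))) (out : List String) : Prop :=
  out = regroup_grids_alt sub_grids
instance (sub_grids : List (List (List String))) (out : List String) : Decidable (Spec_regroup_grids sub_grids out) := by
  unfold Spec_regroup_grids; infer_instance

-- ===== CLAIM =====
def Claim_equal_regroup_grids : Prop := ∀ (sub_grids : List (List (List String))),
  Dom_regroup_grids sub_grids → Pre_regroup_grids sub_grids →
  Spec_regroup_grids sub_grids (regroup_grids sub_grids)

-- ===== LEMMAS AND PROOFS =====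

theorem getD_mem_of_lt {α : Type} (l : List α) (n : Nat) (d : α) (h : n < l.length) :
    l.getD n d ∈ l := by
  rw [List.getD_eq_getElem?_getD, List.getElem?_eq_getElem h]
  exact List.getElem_mem h

theorem flatMap_range_getD {α β : Type} (l : List α) (g : α → List β) (d : α) :
    (List.range l.length).flatMap (fun i => g (l.getD i d)) = l.flatMap g := by
  induction l with
  | nil => simp
  | cons x xs ih =>
    simp only [List.length_cons, List.range_succ_eq_map, List.flatMap_cons, List.flatMap_map,
      Nat.succ_eq_add_one, List.getD_cons_succ, List.getD_cons_zero]
    rw [ih]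

theorem flatMap_singleton_eq_map {α β : Type} (l : List α) (f : α → β) :
    l.flatMap (fun x => [f x]) = l.map f := by
  induction l with
  | nil => rfl
  | cons x xs ih => simp [List.flatMap_cons, ih]

theorem flatMap_congr_mem {α β : Type} (l : List α) (f g : α → List β)
    (h : ∀ a ∈ l, f a = g a) : l.flatMap f = l.flatMap g := by
  induction l with
  | nil => rfl
  | cons x xs ih =>
    rw [List.flatMap_cons, List.flatMap_cons, h x (by simp), ih (fun a ha => h a (by simp [ha]))]

theorem A_eq (s : List (List (List String))) :
    regroup_grids s = (List.range s.length).flatMap (fun row =>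
      (List.range ((s.getD 0 []).getD 0 []).length).map (fun subrow =>
        String.ofList ((List.range (s.getD 0 []).length).flatMap (fun column =>
          (((s.getD row []).getD column []).getD subrow "").toList)))) := by
  unfold regroup_grids
  simp only [PySem.List.pyGetD_zero, PySem.List.pyRange_zero_nat, List.foldl_map,
    PySem.List.pyGetD_natCast, PySem.List.foldl_append_eq_flatMap, List.nil_append]
  simp only [flatMap_singleton_eq_map]

theorem B_eq (s : List (List (List String))) (hne : s ≠ []) :
    regroup_grids_alt s = s.flatMap (fun block =>
      (block.take (s.getD 0 []).length).foldl
        (fun rows col => (List.range ((s.getD 0 []).getD 0 []).length).map (fun j =>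
          rows.getD j "" ++ col.getD j ""))
        (List.replicate ((s.getD 0 []).getD 0 []).length "")) := by
  unfold regroup_grids_alt
  have h0 : s.isEmpty = false := by cases s with | nil => exact absurd rfl hne | cons x xs => rfl
  simp only [h0, Bool.false_eq_true, if_false, PySem.List.pyGetD_zero,
    PySem.List.slice_to_natCast, PySem.List.pyRange_zero_nat, List.map_map,
    Function.comp_def, PySem.List.pyGetD_natCast, PySem.List.foldl_append_eq_flatMap,
    List.nil_append]

theorem getD_map_range {α : Type} (r0 j : Nat) (g : Nat → α) (d : α) (hj : j < r0) :
    ((List.range r0).map g).getD j d = g j := by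
  rw [List.getD_eq_getElem?_getD,
    List.getElem?_eq_getElem (by simp [hj] : j < ((List.range r0).map g).length)]
  simp

-- the column fold: folding the columns cs into a vector of r0 partial rows, starting from any
-- vector (range r0).map g, appends at each position j the j-th entry of every column in order
theorem fold_idx (r0 : Nat) (cs : List (List String)) (g : Nat → String) :
    cs.foldl (fun rows col => (List.range r0).map (fun j =>
        rows.getD j "" ++ col.getD j "")) ((List.range r0).map g)
    = (List.range r0).map (fun j =>
        String.ofList ((g j).toList ++ cs.flatMap (fun col => (col.getD j "").toList))) := by
  induction cs generalizing g with
  | nil =>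
    simp only [List.foldl_nil, List.flatMap_nil, List.append_nil, String.ofList_toList]
  | cons c cs ih =>
    rw [List.foldl_cons]
    have hstep : (List.range r0).map (fun j =>
        ((List.range r0).map g).getD j "" ++ c.getD j "")
        = (List.range r0).map (fun j => g j ++ c.getD j "") := by
      apply List.map_congr_left
      intro j hj
      rw [getD_map_range r0 j g "" (List.mem_range.mp hj)]
    rw [hstep, ih (fun j => g j ++ c.getD j "")]
    apply List.map_congr_left
    intro j hj
    rw [List.flatMap_cons, String.toList_append]
    simp [List.append_assoc]

-- take n as a flatMap over range n (n within bounds)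
theorem flatMap_take_eq_range {α β : Type} (l : List α) (n : Nat) (f : α → List β) (d : α)
    (h : n ≤ l.length) :
    (l.take n).flatMap f = (List.range n).flatMap (fun i => f (l.getD i d)) := by
  have hlen : (l.take n).length = n := by simp [h]
  rw [← flatMap_range_getD (l.take n) f d, hlen]
  apply flatMap_congr_mem
  intro i hi
  rw [List.mem_range] at hi
  congr 1
  have hil : i < l.length := by omega
  rw [List.getD_eq_getElem?_getD, List.getD_eq_getElem?_getD,
    List.getElem?_eq_getElem (by omega : i < (l.take n).length), List.getElem?_eq_getElem hil,
    Option.getD_some, Option.getD_some, List.getElem_take]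

theorem replicate_eq_map_range {α : Type} (r0 : Nat) (d : α) :
    List.replicate r0 d = (List.range r0).map (fun _ => d) := by
  simp [List.map_const']

-- one block, well-shaped case
theorem block_eq (b : List (List String)) (c0 r0 : Nat) (hb : c0 ≤ b.length) :
    (b.take c0).foldl (fun rows col => (List.range r0).map (fun j =>
        rows.getD j "" ++ col.getD j "")) (List.replicate r0 "")
    = (List.range r0).map (fun subrow =>
        String.ofList ((List.range c0).flatMap (fun column =>
          ((b.getD column []).getD subrow "").toList))) := by
  rw [replicate_eq_map_range, fold_idx]
  apply List.map_congr_left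
  intro j hj
  rw [flatMap_take_eq_range b c0 _ [] hb]
  rfl

-- one block, r0 = 0 case: the row vector is empty throughout
theorem block_zero (b : List (List String)) (c0 : Nat) :
    (b.take c0).foldl (fun rows col => (List.range 0).map (fun j =>
        rows.getD j "" ++ col.getD j "")) (List.replicate 0 "") = [] := by
  rw [replicate_eq_map_range, fold_idx]
  rfl

-- ===== VERDICT =====
theorem regroup_grids_spec : Claim_equal_regroup_grids := by
  intro s _ hpre
  unfold Spec_regroup_grids
  rcases hpre with rfl | ⟨hb0, hcase⟩
  · rfl
  have hne : s ≠ [] := by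
    intro h; rw [h] at hb0; exact hb0 rfl
  rw [A_eq, B_eq s hne,
    ← flatMap_range_getD s (fun block =>
      (block.take (s.getD 0 []).length).foldl
        (fun rows col => (List.range ((s.getD 0 []).getD 0 []).length).map (fun j =>
          rows.getD j "" ++ col.getD j ""))
        (List.replicate ((s.getD 0 []).getD 0 []).length "")) []]
  apply flatMap_congr_mem
  intro row hrow
  rw [List.mem_range] at hrow
  rcases hcase with hr0 | hshape
  · rw [hr0, block_zero]
    simp
  · obtain ⟨hb, -⟩ := hshape (s.getD row []) (getD_mem_of_lt s row [] hrow)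
    exact (block_eq (s.getD row []) _ _ hb).symm
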